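-- pv_equiv track=rewrite | github.com/rumca-js/simple-crawler | src/serializers.py | entry_jsons_to_rss
-- ===== SOURCE A (Python) =====
-- def entry_jsons_to_rss(entries, channel_info=""):
--     """
--     Channel info can be for example <title>Channel Title</title>
--     """
--     items = ""
--     for entry in entries:
--         entry_info = "<item>\n"
--
--         if entry.get("title"):
--             entry_info += f"<title><![CDATA[{entry['title']}]]></title>\n"
--         if entry.get("link"):
--             entry_info += f"<link><![CDATA[{entry['link']}]]></link>\n"
--         if entry.get("description"):
--             entry_info += (
--                 f"<description><![CDATA[{entry['description']}]]></description>\n"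
--             )
--         if entry.get("date_published"):
--             entry_info += f"<pubDate><![CDATA[{entry['date_published']}]]></pubDate>\n"
--         if entry.get("thumbnail"):
--             entry_info += f"<media:thumbnail url=\"{entry['thumbnail']}\"/>\n"
--
--         entry_info += "</item>\n"
--
--         items += entry_info
--
--     return items
-- ===== SOURCE B (Python) =====
-- TEMPLATES = {
--     "title": ("<title><![CDATA[", "]]></title>\n"),
--     "link": ("<link><![CDATA[", "]]></link>\n"),
--     "description": ("<description><![CDATA[", "]]></description>\n"),
--     "date_published": ("<pubDate><![CDATA[", "]]></pubDate>\n"),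
--     "thumbnail": ("<media:thumbnail url=\"", "\"/>\n"),
-- }
-- ORDER = ("title", "link", "description", "date_published", "thumbnail")
--
--
-- def entry_jsons_to_rss(entries, channel_info=""):
--     """
--     Channel info can be for example <title>Channel Title</title>
--     """
--     out = []
--     for entry in entries:
--         # one scan over the entry's own items, not five probes of the schema
--         found = {}
--         for key, value in entry.items():
--             if key in TEMPLATES and value:
--                 pre, post = TEMPLATES[key]
--                 found[key] = pre + value + post
--         out.append("<item>\n" + "".join(found[k] for k in ORDER if k in found) + "</item>\n")
--     return "".join(out)
-- ===== Notes on version B (the rewrite author's own statement) =====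
-- stated objective: alternative
-- what changed: Instead of probing the entry dict for each of five schema keys with conditional '+=' concatenation, B scans each entry's items once, looks each key up in a template dict, collects rendered fields into a map, and then emits them in the canonical field order with ''.join.
import Mathlib
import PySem

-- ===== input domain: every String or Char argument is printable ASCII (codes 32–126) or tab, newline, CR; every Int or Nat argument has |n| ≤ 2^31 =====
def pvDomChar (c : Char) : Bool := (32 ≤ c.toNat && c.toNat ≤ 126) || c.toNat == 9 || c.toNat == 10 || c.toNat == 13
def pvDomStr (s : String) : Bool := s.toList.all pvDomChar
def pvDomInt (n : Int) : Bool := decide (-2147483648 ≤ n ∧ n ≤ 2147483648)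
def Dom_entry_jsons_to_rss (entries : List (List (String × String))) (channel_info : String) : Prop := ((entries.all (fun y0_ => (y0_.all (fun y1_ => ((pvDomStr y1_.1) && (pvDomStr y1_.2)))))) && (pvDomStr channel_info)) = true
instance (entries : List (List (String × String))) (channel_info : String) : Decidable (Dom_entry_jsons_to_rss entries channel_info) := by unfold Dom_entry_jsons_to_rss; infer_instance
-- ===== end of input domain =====

-- B replaces A's five schema probes per entry by one scan over the entry's own items against a
-- template dict, collecting rendered fields in a map and emitting them in canonical order
-- (objective: alternative; same output).

-- ===== PORT A =====
-- entry.get(key): the Python argument is a dict built from the pairs (duplicate keys keep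
-- the last value); missing key → None, which is falsy like "". Exact via PySem.Dict.
def pvEntryGet (entry : List (String × String)) (k : String) : String :=
  (PySem.Dict.ofList entry).getD k ""

def entry_jsons_to_rss (entries : List (List (String × String))) (channel_info : String) : String :=
  entries.foldl
    (fun items entry =>
      let entry_info := "<item>\n"
      let entry_info := if pvEntryGet entry "title" ≠ "" then
          entry_info ++ "<title><![CDATA[" ++ pvEntryGet entry "title" ++ "]]></title>\n" else entry_info
      let entry_info := if pvEntryGet entry "link" ≠ "" then
          entry_info ++ "<link><![CDATA[" ++ pvEntryGet entry "link" ++ "]]></link>\n" else entry_info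
      let entry_info := if pvEntryGet entry "description" ≠ "" then
          entry_info ++ "<description><![CDATA[" ++ pvEntryGet entry "description" ++ "]]></description>\n" else entry_info
      let entry_info := if pvEntryGet entry "date_published" ≠ "" then
          entry_info ++ "<pubDate><![CDATA[" ++ pvEntryGet entry "date_published" ++ "]]></pubDate>\n" else entry_info
      let entry_info := if pvEntryGet entry "thumbnail" ≠ "" then
          entry_info ++ "<media:thumbnail url=\"" ++ pvEntryGet entry "thumbnail" ++ "\"/>\n" else entry_info
      let entry_info := entry_info ++ "</item>\n"
      items ++ entry_info)
    ""

-- ===== PORT B =====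
def pvTEMPLATES : PySem.Dict String (String × String) :=
  PySem.Dict.ofList
    [("title", ("<title><![CDATA[", "]]></title>\n")),
     ("link", ("<link><![CDATA[", "]]></link>\n")),
     ("description", ("<description><![CDATA[", "]]></description>\n")),
     ("date_published", ("<pubDate><![CDATA[", "]]></pubDate>\n")),
     ("thumbnail", ("<media:thumbnail url=\"", "\"/>\n"))]

def pvORDER : List String := ["title", "link", "description", "date_published", "thumbnail"]

-- the body of B's inner loop over entry.items()
def pvStep (found : PySem.Dict String String) (kv : String × String) : PySem.Dict String String :=
  if pvTEMPLATES.contains kv.1 && kv.2 ≠ "" then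
    let pp := pvTEMPLATES.getD kv.1 ("", "")
    found.insert kv.1 (pp.1 ++ kv.2 ++ pp.2)
  else found

def pvItemB (entry : List (String × String)) : String :=
  let found := ((PySem.Dict.ofList entry).items).foldl pvStep PySem.Dict.empty
  "<item>\n" ++ String.join (pvORDER.filterMap (fun k => found.get? k)) ++ "</item>\n"

def entry_jsons_to_rss_alt (entries : List (List (String × String))) (channel_info : String) : String :=
  String.join (entries.map pvItemB)

-- ===== PRECONDITION & SPEC =====
def Spec_entry_jsons_to_rss (entries : List (List (String × String))) (channel_info : String) (out : String) : Prop := out = entry_jsons_to_rss_alt entries channel_info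
instance (entries : List (List (String × String))) (channel_info : String) (out : String) : Decidable (Spec_entry_jsons_to_rss entries channel_info out) := by unfold Spec_entry_jsons_to_rss; infer_instance

-- ===== CLAIM (what is proved, stated in full; the proofs are below) =====
def Claim_equal_entry_jsons_to_rss : Prop := ∀ (entries : List (List (String × String))) (channel_info : String), Dom_entry_jsons_to_rss entries channel_info → Spec_entry_jsons_to_rss entries channel_info (entry_jsons_to_rss entries channel_info)

-- ===== LEMMAS AND PROOFS =====

theorem pv_foldl_str : ∀ (xs : List String) (a b : String),
    xs.foldl (· ++ ·) (a ++ b) = a ++ xs.foldl (· ++ ·) b := by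
  intro xs
  induction xs with
  | nil => intro a b; rfl
  | cons x xs ih =>
      intro a b
      simp only [List.foldl_cons, String.append_assoc]
      exact ih a (b ++ x)

theorem pv_join_cons (x : String) (xs : List String) :
    String.join (x :: xs) = x ++ String.join xs := by
  simp only [String.join, List.foldl_cons]
  have := pv_foldl_str xs x ""
  simpa using this

theorem pv_foldl_append (f : List (String × String) → String) :
    ∀ (l : List (List (String × String))) (acc : String),
      l.foldl (fun s e => s ++ f e) acc = acc ++ String.join (l.map f) := by
  intro l
  induction l with
  | nil => intro acc; simp [String.join]
  | cons e l ih =>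
      intro acc
      rw [List.foldl_cons, ih (acc ++ f e), List.map_cons, pv_join_cons]
      simp [String.append_assoc]

-- a key absent from l is untouched by the inner fold
theorem pv_fold_get_not_mem (q : String) :
    ∀ (l : List (String × String)) (f0 : PySem.Dict String String),
      q ∉ l.map Prod.fst → (l.foldl pvStep f0).get? q = f0.get? q := by
  intro l
  induction l with
  | nil => intro f0 _; rfl
  | cons kv t ih =>
      intro f0 h
      simp only [List.map_cons, List.mem_cons, not_or] at h
      rw [List.foldl_cons, ih _ h.2]
      unfold pvStep
      split
      · exact PySem.Dict.get?_insert_of_ne _ _ h.1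
      · rfl

-- what the inner fold's lookup returns, for pairwise-distinct keys
theorem pv_fold_get (q : String) :
    ∀ (l : List (String × String)) (f0 : PySem.Dict String String),
      (l.map Prod.fst).Nodup →
      (l.foldl pvStep f0).get? q =
        match (PySem.Dict.mk l).get? q with
        | none => f0.get? q
        | some v =>
            if pvTEMPLATES.contains q && v ≠ "" then
              some ((pvTEMPLATES.getD q ("", "")).1 ++ v ++ (pvTEMPLATES.getD q ("", "")).2)
            else f0.get? q := by
  intro l
  induction l with
  | nil => intro f0 _; rfl
  | cons kv t ih =>
      intro f0 hnd
      simp only [List.map_cons, List.nodup_cons] at hnd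
      rw [List.foldl_cons, PySem.Dict.get?_mk_cons]
      by_cases hq : kv.1 = q
      · subst hq
        simp only [beq_self_eq_true, if_pos]
        rw [pv_fold_get_not_mem _ _ _ hnd.1]
        unfold pvStep
        split
        · next hc => simp [PySem.Dict.get?_insert_self]
        · next hc => simp
      · have : (kv.1 == q) = false := by simp [hq]
        rw [this, if_neg (by simp)]
        rw [ih _ hnd.2]
        have hf0 : (pvStep f0 kv).get? q = f0.get? q := by
          unfold pvStep
          split
          · exact PySem.Dict.get?_insert_of_ne _ _ (Ne.symm hq)
          · rfl
        cases (PySem.Dict.mk t).get? q <;> simp [hf0]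

-- lookup in the collected map, for a key carried by the template dict
theorem pv_found_get (entry : List (String × String)) (q pre post : String)
    (hq : pvTEMPLATES.get? q = some (pre, post)) :
    (((PySem.Dict.ofList entry).items).foldl pvStep PySem.Dict.empty).get? q =
      (if pvEntryGet entry q ≠ "" then some (pre ++ pvEntryGet entry q ++ post) else none) := by
  have hnd : (((PySem.Dict.ofList entry).items).map Prod.fst).Nodup := by
    have := PySem.Dict.nodup_keys_ofList (κ := String) (ν := String) entry
    simpa [PySem.Dict.keys] using this
  rw [pv_fold_get q _ _ hnd]
  have hmk : PySem.Dict.mk ((PySem.Dict.ofList entry).items) = PySem.Dict.ofList entry := rfl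
  rw [hmk]
  have hc : pvTEMPLATES.contains q = true := by
    rw [PySem.Dict.contains_eq_isSome_get?, hq]; rfl
  have hE : pvEntryGet entry q = ((PySem.Dict.ofList entry).get? q).getD "" := by
    unfold pvEntryGet; simp [PySem.Dict.getD_eq_get?_getD]
  cases hg : (PySem.Dict.ofList entry).get? q with
  | none => simp [hE, hg, PySem.Dict.get?_empty]
  | some v =>
      by_cases hv : v = ""
      · subst hv; simp [hE, hg, PySem.Dict.get?_empty]
      · have hgd : pvTEMPLATES.getD q ("", "") = (pre, post) := by
          rw [PySem.Dict.getD_eq_get?_getD, hq]; rfl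
        simp [hE, hg, hc, hv, hgd]

-- per-entry equality of the two item builders
set_option maxRecDepth 16384 in
theorem pv_item_eq (entry : List (String × String)) :
    (let entry_info := "<item>\n"
     let entry_info := if pvEntryGet entry "title" ≠ "" then
         entry_info ++ "<title><![CDATA[" ++ pvEntryGet entry "title" ++ "]]></title>\n" else entry_info
     let entry_info := if pvEntryGet entry "link" ≠ "" then
         entry_info ++ "<link><![CDATA[" ++ pvEntryGet entry "link" ++ "]]></link>\n" else entry_info
     let entry_info := if pvEntryGet entry "description" ≠ "" then
         entry_info ++ "<description><![CDATA[" ++ pvEntryGet entry "description" ++ "]]></description>\n" else entry_info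
     let entry_info := if pvEntryGet entry "date_published" ≠ "" then
         entry_info ++ "<pubDate><![CDATA[" ++ pvEntryGet entry "date_published" ++ "]]></pubDate>\n" else entry_info
     let entry_info := if pvEntryGet entry "thumbnail" ≠ "" then
         entry_info ++ "<media:thumbnail url=\"" ++ pvEntryGet entry "thumbnail" ++ "\"/>\n" else entry_info
     entry_info ++ "</item>\n") = pvItemB entry := by
  unfold pvItemB pvORDER
  simp only [List.filterMap]
  rw [pv_found_get entry "title" "<title><![CDATA[" "]]></title>\n" (by rfl),
      pv_found_get entry "link" "<link><![CDATA[" "]]></link>\n" (by rfl),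
      pv_found_get entry "description" "<description><![CDATA[" "]]></description>\n" (by rfl),
      pv_found_get entry "date_published" "<pubDate><![CDATA[" "]]></pubDate>\n" (by rfl),
      pv_found_get entry "thumbnail" "<media:thumbnail url=\"" "\"/>\n" (by rfl)]
  split_ifs <;> (apply String.ext; simp [String.join])

-- ===== VERDICT (by name: the statement is the Claim_ definition above) =====
theorem entry_jsons_to_rss_spec : Claim_equal_entry_jsons_to_rss := by
  intro entries channel_info _
  unfold Spec_entry_jsons_to_rss entry_jsons_to_rss entry_jsons_to_rss_alt
  simp only [pv_item_eq]
  rw [pv_foldl_append pvItemB entries ""]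
  simp
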